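-- pv_equiv track=rewrite | github.com/Mituan02/Metalprot | metalprot/apps/search_struct.py | filter_bivalence_win_by_comb
-- ===== SOURCE A (Python) =====
-- def pair_win_overlap_one(win_x, win_y):
--     if win_x[0] in win_y and win_x[1] not in win_y:
--         return True
--     if win_x[1] in win_y and win_x[0] not in win_y:
--         return True
--     return False
--
-- def filter_bivalence_win_by_comb(win_filters_set):
--     '''
--     The idea is simple. A binding core must contain at least 3 contact amino acids if this is the case.
--     For example the extracted wins could be {[1, 2], [2, 3], [3, 1]} There mush have such an combination.
--     '''
--     win_filter_inds = set()
--     win_filters = list(win_filters_set)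
--     for x in range(len(win_filters)):
--         for y in range(x + 1, len(win_filters)):
--             if not pair_win_overlap_one(win_filters[x], win_filters[y]):
--                 continue
--             for z in range(y + 1, len(win_filters)):
--                 if pair_win_overlap_one(win_filters[x], win_filters[z]) and pair_win_overlap_one(win_filters[y], win_filters[z]):
--                     win_filter_inds.add(win_filters[x][0])
--                     win_filter_inds.add(win_filters[x][1])
--                     win_filter_inds.add(win_filters[y][0])
--                     win_filter_inds.add(win_filters[y][1])
--                     win_filter_inds.add(win_filters[z][0])
--                     win_filter_inds.add(win_filters[z][1])
--     return win_filter_inds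
-- ===== SOURCE B (Python) =====
-- def pair_win_overlap_one(win_x, win_y):
--     if win_x[0] in win_y and win_x[1] not in win_y:
--         return True
--     if win_x[1] in win_y and win_x[0] not in win_y:
--         return True
--     return False
--
-- def filter_bivalence_win_by_comb(win_filters_set):
--     # Build the "overlap-exactly-one" graph once as forward adjacency lists,
--     # then enumerate triangles by scanning neighbour lists with set lookups.
--     wf = list(win_filters_set)
--     n = len(wf)
--     adj = [[y for y in range(x + 1, n) if pair_win_overlap_one(wf[x], wf[y])]
--            for x in range(n)]
--     out = set()
--     for x in range(n):
--         ax = adj[x]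
--         for y in ax:
--             ay = set(adj[y])
--             for z in ax:
--                 if z in ay:
--                     out.add(wf[x][0]); out.add(wf[x][1])
--                     out.add(wf[y][0]); out.add(wf[y][1])
--                     out.add(wf[z][0]); out.add(wf[z][1])
--     return out
-- ===== Notes on version B (the rewrite author's own statement) =====
-- stated objective: faster
-- what changed: Instead of A's triple nested index scan that re-tests overlap for every index pair, B builds the overlap-one graph's forward adjacency lists once and enumerates triangles by scanning each edge's neighbour list with set-membership lookups, so the inner z-scan runs only over actual neighbours of x instead of all later indices and does one hash lookup instead of two overlap tests.
import Mathlib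
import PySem

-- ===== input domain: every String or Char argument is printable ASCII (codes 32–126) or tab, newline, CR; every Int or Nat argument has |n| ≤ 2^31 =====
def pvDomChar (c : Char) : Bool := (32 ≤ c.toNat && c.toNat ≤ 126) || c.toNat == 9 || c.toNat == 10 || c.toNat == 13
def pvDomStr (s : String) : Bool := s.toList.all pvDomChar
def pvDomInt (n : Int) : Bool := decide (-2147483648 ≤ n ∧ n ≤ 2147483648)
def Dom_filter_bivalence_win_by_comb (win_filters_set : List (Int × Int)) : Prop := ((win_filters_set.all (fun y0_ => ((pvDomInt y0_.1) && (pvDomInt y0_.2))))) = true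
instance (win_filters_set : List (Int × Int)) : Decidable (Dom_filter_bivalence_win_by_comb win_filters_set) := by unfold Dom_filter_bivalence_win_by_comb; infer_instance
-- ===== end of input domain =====

-- B replaces A's O(n^3) triple index scan by building the overlap-one graph's forward
-- adjacency lists once and enumerating triangles via neighbour-list scans with set lookups
-- (objective: faster, constant-factor/work proportional to edges instead of all index pairs).

-- ===== PORT A =====
-- helper pair_win_overlap_one: 'v in (p, q)' is v == p or v == q
def pair_win_overlap_one (win_x win_y : Int × Int) : Bool :=
  if (win_x.1 == win_y.1 || win_x.1 == win_y.2) && !(win_x.2 == win_y.1 || win_x.2 == win_y.2) then true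
  else if (win_x.2 == win_y.1 || win_x.2 == win_y.2) && !(win_x.1 == win_y.1 || win_x.1 == win_y.2) then true
  else false

def filter_bivalence_win_by_comb (win_filters_set : List (Int × Int)) : List Int :=
  let win_filters := win_filters_set
  let n : Int := win_filters.length
  (PySem.List.pyRange 0 n 1).foldl (fun acc x =>
    (PySem.List.pyRange (x + 1) n 1).foldl (fun acc y =>
      if !pair_win_overlap_one (PySem.List.pyGetD win_filters x (0, 0)) (PySem.List.pyGetD win_filters y (0, 0)) then acc
      else
        (PySem.List.pyRange (y + 1) n 1).foldl (fun acc z =>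
          if pair_win_overlap_one (PySem.List.pyGetD win_filters x (0, 0)) (PySem.List.pyGetD win_filters z (0, 0)) &&
             pair_win_overlap_one (PySem.List.pyGetD win_filters y (0, 0)) (PySem.List.pyGetD win_filters z (0, 0)) then
            let wx := PySem.List.pyGetD win_filters x (0, 0)
            let wy := PySem.List.pyGetD win_filters y (0, 0)
            let wz := PySem.List.pyGetD win_filters z (0, 0)
            PySem.Set.add (PySem.Set.add (PySem.Set.add (PySem.Set.add (PySem.Set.add (PySem.Set.add acc wx.1) wx.2) wy.1) wy.2) wz.1) wz.2
          else acc) acc) acc) PySem.Set.empty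

-- ===== PORT B =====
def filter_bivalence_win_by_comb_alt (win_filters_set : List (Int × Int)) : List Int :=
  let wf := win_filters_set
  let n : Int := wf.length
  let adj : List (List Int) := (PySem.List.pyRange 0 n 1).map (fun x =>
    (PySem.List.pyRange (x + 1) n 1).filter (fun y =>
      pair_win_overlap_one (PySem.List.pyGetD wf x (0, 0)) (PySem.List.pyGetD wf y (0, 0))))
  (PySem.List.pyRange 0 n 1).foldl (fun acc x =>
    let ax := PySem.List.pyGetD adj x []
    ax.foldl (fun acc y =>
      let ay : PySem.Set Int := PySem.Set.ofList (PySem.List.pyGetD adj y [])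
      ax.foldl (fun acc z =>
        if PySem.Set.contains ay z then
          let wx := PySem.List.pyGetD wf x (0, 0)
          let wy := PySem.List.pyGetD wf y (0, 0)
          let wz := PySem.List.pyGetD wf z (0, 0)
          PySem.Set.add (PySem.Set.add (PySem.Set.add (PySem.Set.add (PySem.Set.add (PySem.Set.add acc wx.1) wx.2) wy.1) wy.2) wz.1) wz.2
        else acc) acc) acc) PySem.Set.empty

-- ===== PRECONDITION & SPEC =====
def Spec_filter_bivalence_win_by_comb (win_filters_set : List (Int × Int)) (out : List Int) : Prop := out = filter_bivalence_win_by_comb_alt win_filters_set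
instance (win_filters_set : List (Int × Int)) (out : List Int) : Decidable (Spec_filter_bivalence_win_by_comb win_filters_set out) := by unfold Spec_filter_bivalence_win_by_comb; infer_instance

-- ===== CLAIM (what is proved, stated in full; the proofs are below) =====
def Claim_equal_filter_bivalence_win_by_comb : Prop := ∀ (win_filters_set : List (Int × Int)), Dom_filter_bivalence_win_by_comb win_filters_set → Spec_filter_bivalence_win_by_comb win_filters_set (filter_bivalence_win_by_comb win_filters_set)


-- ===== LEMMAS AND PROOFS =====

-- abbreviation for the overlap test between the windows at indices i and j
def pvOv (wf : List (Int × Int)) (i j : Int) : Bool :=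
  pair_win_overlap_one (PySem.List.pyGetD wf i (0, 0)) (PySem.List.pyGetD wf j (0, 0))

-- the forward adjacency list of index x (what B stores in adj[x])
def pvAdj (wf : List (Int × Int)) (x : Int) : List Int :=
  (PySem.List.pyRange (x + 1) (wf.length : Int) 1).filter (fun y => pvOv wf x y)

theorem pvAdj_get (wf : List (Int × Int)) {x : Int} (h0 : 0 ≤ x) (h1 : x < (wf.length : Int)) :
    PySem.List.pyGetD ((PySem.List.pyRange 0 (wf.length : Int) 1).map (fun x =>
      (PySem.List.pyRange (x + 1) (wf.length : Int) 1).filter (fun y => pvOv wf x y))) x []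
    = pvAdj wf x := by
  rw [PySem.List.pyGetD_map_pyRange_of_nonneg _ _ _ _ h0 h1]
  rfl

theorem pvMem_adj {wf : List (Int × Int)} {y z : Int} :
    z ∈ pvAdj wf y ↔ (y + 1 ≤ z ∧ z < (wf.length : Int) ∧ pvOv wf y z = true) := by
  simp [pvAdj, List.mem_filter, PySem.List.mem_pyRange_one, and_assoc]

-- a loop that skips on !p (A's y-loop shape) is the fold over the filtered list
theorem pvFoldl_guard {α β : Type} (p : α → Bool) (f : β → α → β) (l : List α) (init : β) :
    l.foldl (fun acc y => if !p y then acc else f acc y) init = (l.filter p).foldl f init := by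
  rw [List.foldl_filter]
  apply PySem.List.foldl_congr_mem
  intro acc x _
  cases p x <;> simp

theorem pvFoldl_if {α β : Type} (p : α → Bool) (f : β → α → β) (l : List α) (init : β) :
    l.foldl (fun acc y => if p y then f acc y else acc) init = (l.filter p).foldl f init :=
  (List.foldl_filter).symm

-- the z-candidates B scans (adj[x] ∩ adj[y]) are exactly the z-candidates A accepts
theorem pvFilter_eq (wf : List (Int × Int)) {x y : Int} (hxy : x < y) (hy : y < (wf.length : Int)) :
    (pvAdj wf x).filter (fun z => PySem.Set.contains (PySem.Set.ofList (pvAdj wf y)) z)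
    = (PySem.List.pyRange (y + 1) (wf.length : Int) 1).filter (fun z => pvOv wf x z && pvOv wf y z) := by
  have hmem : ∀ z : Int, PySem.Set.contains (PySem.Set.ofList (pvAdj wf y)) z = decide (z ∈ pvAdj wf y) := by
    intro z; simp [PySem.Set.contains, PySem.Set.mem_ofList]
  have e1 : pvAdj wf x = (PySem.List.pyRange (x + 1) (wf.length : Int) 1).filter (fun y' => pvOv wf x y') := rfl
  rw [e1, List.filter_filter,
    PySem.List.pyRange_one_append (x + 1) (y + 1) (wf.length : Int) (by omega) (by omega),
    List.filter_append]
  have h1 : (PySem.List.pyRange (x + 1) (y + 1) 1).filter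
      (fun a => PySem.Set.contains (PySem.Set.ofList (pvAdj wf y)) a && pvOv wf x a) = [] := by
    apply List.filter_eq_nil_iff.mpr
    intro z hz
    have hz' := PySem.List.mem_pyRange_one.mp hz
    simp [pvMem_adj]
    omega
  have h2 : (PySem.List.pyRange (y + 1) (wf.length : Int) 1).filter
      (fun a => PySem.Set.contains (PySem.Set.ofList (pvAdj wf y)) a && pvOv wf x a)
      = (PySem.List.pyRange (y + 1) (wf.length : Int) 1).filter (fun z => pvOv wf x z && pvOv wf y z) := by
    apply List.filter_congr
    intro z hz
    have hz' := PySem.List.mem_pyRange_one.mp hz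
    have : decide (z ∈ pvAdj wf y) = pvOv wf y z := by
      simp [pvMem_adj, hz'.1, hz'.2]
    rw [hmem z, this, Bool.and_comm]
  rw [h1, h2, List.nil_append]

theorem pvMain (wf : List (Int × Int)) :
    filter_bivalence_win_by_comb wf = filter_bivalence_win_by_comb_alt wf := by
  simp only [filter_bivalence_win_by_comb, filter_bivalence_win_by_comb_alt,
    show ∀ i j : Int, pair_win_overlap_one (PySem.List.pyGetD wf i (0, 0)) (PySem.List.pyGetD wf j (0, 0)) = pvOv wf i j from fun _ _ => rfl]
  apply PySem.List.foldl_congr_mem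
  intro acc x hx
  obtain ⟨hx0, hxn⟩ := PySem.List.mem_pyRange_one.mp hx
  rw [pvAdj_get wf hx0 hxn, pvFoldl_guard]
  have ex : (PySem.List.pyRange (x + 1) (wf.length : Int) 1).filter (fun y => pvOv wf x y) = pvAdj wf x := rfl
  rw [ex]
  apply PySem.List.foldl_congr_mem
  intro acc' y hy
  obtain ⟨hxy, hyn, hovxy⟩ := pvMem_adj.mp hy
  rw [pvAdj_get wf (by omega) hyn, pvFoldl_if, pvFoldl_if, pvFilter_eq wf (by omega) hyn]


-- ===== VERDICT (by name: the statement is the Claim_ definition above) =====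
theorem filter_bivalence_win_by_comb_spec : Claim_equal_filter_bivalence_win_by_comb := by
  intro wf _
  unfold Spec_filter_bivalence_win_by_comb
  exact pvMain wf
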